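-- pv_equiv track=rewrite | github.com/infinity0n3/chaos-generator | python/extensions/language/cpp.py | cpp_blockcomment_filter
-- ===== SOURCE A (Python) =====
-- def cpp_blockcomment_filter(block):
-- 	start_comment = '/** '
-- 	line_comment = ' * '
-- 	end_comment = ' **/'
--
-- 	result = []
-- 	lines = block.split('\n');
--
-- 	result.append(start_comment)
--
-- 	for line in lines:
-- 		result.append(line_comment + line)
--
-- 	result.append(end_comment)
--
-- 	return "\n".join(result)
-- ===== SOURCE B (Python) =====
-- def cpp_blockcomment_filter(block):
-- 	body = ' * ' + block.replace('\n', '\n * ')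
-- 	return '/** \n' + body + '\n **/'
-- ===== Notes on version B (the rewrite author's own statement) =====
-- stated objective: simpler
-- what changed: Replaces the split-into-lines / per-line-append loop / join pipeline with a single whole-string replace that inserts the line-comment prefix after every newline, plus fixed prefix and suffix concatenations; no list of lines is built.
import Mathlib
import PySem

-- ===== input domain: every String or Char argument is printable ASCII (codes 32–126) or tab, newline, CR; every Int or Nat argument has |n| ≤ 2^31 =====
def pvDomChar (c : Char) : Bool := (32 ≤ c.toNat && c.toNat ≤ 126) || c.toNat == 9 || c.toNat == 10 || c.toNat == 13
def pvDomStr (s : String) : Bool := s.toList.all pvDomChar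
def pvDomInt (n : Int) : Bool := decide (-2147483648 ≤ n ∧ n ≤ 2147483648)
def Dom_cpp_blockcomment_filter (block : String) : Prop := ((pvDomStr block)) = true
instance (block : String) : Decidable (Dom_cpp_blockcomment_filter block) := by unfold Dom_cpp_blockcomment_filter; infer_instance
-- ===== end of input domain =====

-- B replaces A's split/loop/join pipeline with a single whole-string replace plus fixed prefix/suffix; simpler, same cost.


-- ===== PORT A =====
-- literal transliteration of A (split on '\n', prepend ' * ' to each line in a loop, join with '\n');
-- runs on List Char via PySem.Chars (exact on the ASCII domain), String.ofList at the end
def cpp_blockcomment_filter (block : String) : String :=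
  let start_comment := "/** ".toList
  let line_comment := " * ".toList
  let end_comment := " **/".toList
  let result : List (List Char) := []
  let lines := PySem.Chars.splitOn block.toList "\n".toList
  let result := result ++ [start_comment]
  let result := lines.foldl (fun r line => r ++ [line_comment ++ line]) result
  let result := result ++ [end_comment]
  String.ofList (PySem.Chars.join "\n".toList result)

-- ===== PORT B =====
-- literal transliteration of B: ' * ' + block.replace('\n', '\n * '), wrapped by the fixed markers
def cpp_blockcomment_filter_alt (block : String) : String :=
  let body := " * ".toList ++ PySem.Chars.replace block.toList "\n".toList "\n * ".toList
  String.ofList ("/** \n".toList ++ body ++ "\n **/".toList)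

-- ===== PRECONDITION & SPEC =====
def Spec_cpp_blockcomment_filter (block : String) (out : String) : Prop := out = cpp_blockcomment_filter_alt block
instance (block : String) (out : String) : Decidable (Spec_cpp_blockcomment_filter block out) := by unfold Spec_cpp_blockcomment_filter; infer_instance

-- ===== CLAIM (what is proved, stated in full; the proofs are below) =====
def Claim_equal_cpp_blockcomment_filter : Prop := ∀ (block : String), Dom_cpp_blockcomment_filter block → Spec_cpp_blockcomment_filter block (cpp_blockcomment_filter block)

-- ===== LEMMAS AND PROOFS =====

-- simple structural recursions characterising A's split and B's replace (with sep '\n', new '\n * ')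
def pvSplitGo : List Char → List Char → List (List Char)
  | [], cur => [cur.reverse]
  | c :: t, cur => if c = '\n' then cur.reverse :: pvSplitGo t [] else pvSplitGo t (c :: cur)

def pvRep : List Char → List Char
  | [] => []
  | c :: t => if c = '\n' then '\n' :: ' ' :: '*' :: ' ' :: pvRep t else c :: pvRep t

theorem splitOn_go_eq : ∀ (fuel : Nat) (l cur : List Char) (acc : List (List Char)),
    l.length ≤ fuel →
    PySem.Chars.splitOn.go ['\n'] fuel l cur acc = acc.reverse ++ pvSplitGo l cur := by
  intro fuel
  induction fuel with
  | zero =>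
      intro l cur acc h
      have : l = [] := List.eq_nil_of_length_eq_zero (Nat.le_zero.mp h)
      subst this
      simp [PySem.Chars.splitOn.go, pvSplitGo]
  | succ n ih =>
      intro l cur acc h
      cases l with
      | nil => simp [PySem.Chars.splitOn.go, pvSplitGo]
      | cons c t =>
          simp only [List.length_cons, Nat.succ_le_succ_iff] at h
          by_cases hc : c = '\n'
          · subst hc
            rw [PySem.Chars.splitOn.go]
            rw [if_pos (by simp [List.isPrefixOf])]
            simp only [List.length_cons, List.length_nil, List.drop_succ_cons, List.drop_zero]
            rw [ih t [] (cur.reverse :: acc) h]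
            simp [pvSplitGo]
          · rw [PySem.Chars.splitOn.go]
            rw [if_neg (by simp [List.isPrefixOf]; intro h'; exact hc h'.symm)]
            rw [ih t (c :: cur) acc h]
            simp [pvSplitGo, hc]

theorem replace_go_eq : ∀ (fuel : Nat) (l acc : List Char),
    l.length ≤ fuel →
    PySem.Chars.replace.go ['\n'] ['\n', ' ', '*', ' '] fuel l acc = acc.reverse ++ pvRep l := by
  intro fuel
  induction fuel with
  | zero =>
      intro l acc h
      have : l = [] := List.eq_nil_of_length_eq_zero (Nat.le_zero.mp h)
      subst this
      simp [PySem.Chars.replace.go, pvRep]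
  | succ n ih =>
      intro l acc h
      cases l with
      | nil => simp [PySem.Chars.replace.go, pvRep]
      | cons c t =>
          simp only [List.length_cons, Nat.succ_le_succ_iff] at h
          by_cases hc : c = '\n'
          · subst hc
            rw [PySem.Chars.replace.go]
            rw [if_pos (by simp [List.isPrefixOf])]
            simp only [List.length_cons, List.length_nil, List.drop_succ_cons, List.drop_zero]
            rw [ih t _ h]
            simp [pvRep]
          · rw [PySem.Chars.replace.go]
            rw [if_neg (by simp [List.isPrefixOf]; intro h'; exact hc h'.symm)]
            rw [ih t (c :: acc) h]
            simp [pvRep, hc]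

theorem pvSplitGo_ne_nil (l cur : List Char) : pvSplitGo l cur ≠ [] := by
  induction l generalizing cur with
  | nil => simp [pvSplitGo]
  | cons c t ih =>
      simp only [pvSplitGo]
      split_ifs
      · simp
      · exact ih _

theorem intercalate_cons_of_ne_nil {α : Type} (sep a : List α) (l : List (List α)) (h : l ≠ []) :
    List.intercalate sep (a :: l) = a ++ sep ++ List.intercalate sep l := by
  cases l with
  | nil => exact absurd rfl h
  | cons b t => simp [List.intercalate, List.intersperse]

theorem foldl_append_map (lc : List Char) : ∀ (lines : List (List Char)) (r : List (List Char)),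
    lines.foldl (fun r line => r ++ [lc ++ line]) r = r ++ lines.map (lc ++ ·) := by
  intro lines
  induction lines with
  | nil => simp
  | cons x xs ih => intro r; simp [List.foldl_cons, ih]

theorem mid_eq (l cur : List Char) :
    List.intercalate ['\n'] (((pvSplitGo l cur).map (fun line => [' ', '*', ' '] ++ line)) ++ [[' ', '*', '*', '/']]) =
      [' ', '*', ' '] ++ cur.reverse ++ pvRep l ++ ['\n', ' ', '*', '*', '/'] := by
  induction l generalizing cur with
  | nil => simp [pvSplitGo, pvRep, List.intercalate, List.intersperse]
  | cons c t ih =>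
      by_cases hc : c = '\n'
      · subst hc
        rw [show pvSplitGo ('\n' :: t) cur = cur.reverse :: pvSplitGo t [] from by simp [pvSplitGo]]
        rw [List.map_cons, List.cons_append]
        rw [intercalate_cons_of_ne_nil _ _ _ (by simp [pvSplitGo_ne_nil])]
        rw [ih []]
        simp [pvRep]
      · rw [show pvSplitGo (c :: t) cur = pvSplitGo t (c :: cur) from by simp [pvSplitGo, hc]]
        rw [ih (c :: cur)]
        simp [pvRep, hc]

-- ===== VERDICT (by name: the statement is the Claim_ definition above) =====
theorem cpp_blockcomment_filter_spec : Claim_equal_cpp_blockcomment_filter := by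
  intro block _
  unfold Spec_cpp_blockcomment_filter cpp_blockcomment_filter cpp_blockcomment_filter_alt
  simp only [show ("\n" : String).toList = ['\n'] from rfl,
    show ("/** " : String).toList = ['/', '*', '*', ' '] from rfl,
    show (" * " : String).toList = [' ', '*', ' '] from rfl,
    show (" **/" : String).toList = [' ', '*', '*', '/'] from rfl,
    show ("/** \n" : String).toList = ['/', '*', '*', ' ', '\n'] from rfl,
    show ("\n * " : String).toList = ['\n', ' ', '*', ' '] from rfl,
    show ("\n **/" : String).toList = ['\n', ' ', '*', '*', '/'] from rfl]
  rw [PySem.Chars.splitOn]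
  rw [splitOn_go_eq _ _ _ _ (by omega)]
  rw [PySem.Chars.replace]
  rw [if_neg (by simp)]
  rw [replace_go_eq _ _ _ (le_refl _)]
  rw [foldl_append_map]
  unfold PySem.Chars.join
  simp only [List.reverse_nil, List.nil_append, List.singleton_append]
  rw [List.cons_append]
  rw [intercalate_cons_of_ne_nil ['\n'] ['/', '*', '*', ' ']
        (List.map (fun x => [' ', '*', ' '] ++ x) (pvSplitGo block.toList []) ++ [[' ', '*', '*', '/']])
        (by simp)]
  rw [mid_eq]
  simp
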